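-- pv_equiv track=rewrite | github.com/barbabjetolov-zz/g-code_conversion | modules/ind_tools.py | import_variables
-- ===== SOURCE A (Python) =====
-- def import_variables(content):
--     dict_content = {}
--     for c in content:
--         if bool(c) != False:
--             try:
--                 dict_content[c.split(' ')[0]] = c.split(' ')[2].replace('^','**')
--             except IndexError:
--                 break
--     return dict_content
-- ===== SOURCE B (Python) =====
-- def import_variables(content):
--     n = len(content)
--     cut = next((i for i, c in enumerate(content) if c and len(c.split(' ')) < 3), n)
--     return {c.split(' ')[0]: c.split(' ')[2].replace('^', '**')
--             for c in content[:cut] if c}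
-- ===== Notes on version B (the rewrite author's own statement) =====
-- stated objective: idiomatic
-- what changed: Replaces the loop with break-on-IndexError by two passes: first find the cut-off index (first truthy line with fewer than three space-separated tokens), then a dict comprehension over the truncated prefix filtering truthy lines.
import Mathlib
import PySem

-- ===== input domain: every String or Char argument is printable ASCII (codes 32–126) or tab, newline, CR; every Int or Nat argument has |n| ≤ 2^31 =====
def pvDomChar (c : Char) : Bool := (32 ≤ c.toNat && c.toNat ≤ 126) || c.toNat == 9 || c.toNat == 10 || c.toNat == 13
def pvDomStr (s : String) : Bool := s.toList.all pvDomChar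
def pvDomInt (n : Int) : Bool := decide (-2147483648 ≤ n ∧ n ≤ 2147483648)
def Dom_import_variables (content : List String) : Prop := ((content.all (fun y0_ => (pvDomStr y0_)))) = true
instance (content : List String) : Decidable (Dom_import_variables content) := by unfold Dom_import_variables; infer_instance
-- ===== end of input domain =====

-- B computes the same dict by truncating at the first offending line first, then a filtered mapping pass (idiomatic decomposition; same cost).


-- ===== PORT A =====
-- break-on-IndexError loop: stop (returning the dict so far) at the first truthy line
-- whose single-space split has no index 2; c.split(' ')[0] always exists (split of a
-- nonempty string is nonempty), ported as headD "".
def importA_loop (d : PySem.Dict String String) : List String → PySem.Dict String String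
  | [] => d
  | c :: rest =>
    if c ≠ "" then
      let parts := (PySem.Str.split? c " ").getD []
      match parts[2]? with
      | none => d
      | some v => importA_loop (d.insert (parts.headD "") (PySem.Str.replace v "^" "**")) rest
    else importA_loop d rest

def import_variables (content : List String) : List (String × String) :=
  (importA_loop PySem.Dict.empty content).items

-- ===== PORT B =====
-- the generator's predicate (truthy line with < 3 single-space tokens)
def altBad (c : String) : Bool := c ≠ "" && ((PySem.Str.split? c " ").getD []).length < 3
-- one dict-comprehension step; content[:cut] guarantees index 2 exists, ported with getD
def altStep (d : PySem.Dict String String) (c : String) : PySem.Dict String String :=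
  let parts := (PySem.Str.split? c " ").getD []
  d.insert (parts.headD "") (PySem.Str.replace (parts.getD 2 "") "^" "**")

def import_variables_alt (content : List String) : List (String × String) :=
  let cut := content.findIdx altBad
  ((((content.take cut).filter (fun c => c ≠ ""))).foldl altStep PySem.Dict.empty).items

-- ===== PRECONDITION & SPEC =====
def Spec_import_variables (content : List String) (out : List (String × String)) : Prop := out = import_variables_alt content
instance (content : List String) (out : List (String × String)) : Decidable (Spec_import_variables content out) := by unfold Spec_import_variables; infer_instance

-- ===== CLAIM (what is proved, stated in full; the proofs are below) =====
def Claim_equal_import_variables : Prop := ∀ (content : List String), Dom_import_variables content → Spec_import_variables content (import_variables content)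

-- ===== LEMMAS AND PROOFS =====
theorem importA_loop_eq (content : List String) : ∀ (d : PySem.Dict String String),
    importA_loop d content =
      ((content.take (content.findIdx altBad)).filter (fun c => c ≠ "")).foldl altStep d := by
  induction content with
  | nil => intro d; simp [importA_loop]
  | cons c rest ih =>
    intro d
    by_cases hc : c = ""
    · subst hc
      have hb : altBad "" = false := by simp [altBad]
      simp [importA_loop, List.findIdx_cons, hb, List.take_succ_cons, ih]
    · rcases h2 : ((PySem.Str.split? c " ").getD [])[2]? with _ | v
      · have hlen : ((PySem.Str.split? c " ").getD []).length ≤ 2 := by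
          simpa using List.getElem?_eq_none_iff.mp h2
        have hb : altBad c = true := by
          simp [altBad, hc]; omega
        simp [importA_loop, hc, h2, List.findIdx_cons, hb]
      · have hlen : 2 < ((PySem.Str.split? c " ").getD []).length := (List.getElem?_eq_some_iff.mp h2).1
        have hb : altBad c = false := by simp [altBad, hc]; omega
        simp [importA_loop, hc, h2, List.findIdx_cons, hb, ih, altStep]


-- ===== VERDICT (by name: the statement is the Claim_ definition above) =====
theorem import_variables_spec : Claim_equal_import_variables := by
  intro content _
  unfold Spec_import_variables import_variables import_variables_alt
  rw [importA_loop_eq]
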